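-- pv_equiv track=rewrite | github.com/bellDev-code/Challenge_Algorithm | programmers/Ohsulgi/today08/08-todayChallenge.py | solution
-- ===== SOURCE A (Python) =====
-- def solution(s):
--     s_dict = {}
--     for i in s:
--         if i not in s_dict:
--             s_dict[i] = 1
--         else:
--             s_dict[i] += 1
--
--     s_list = [i for i in s_dict if s_dict[i] == 1]
--     s_list.sort()
--
--     answer = ''.join(s_list)
--     return answer
-- ===== SOURCE B (Python) =====
-- def solution(s):
--     # Sort the characters, then walk consecutive runs of equal characters;
--     # a run of length exactly 1 is a character occurring once, and the sorted
--     # walk emits them already in order.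
--     t = sorted(s)
--     out = []
--     i = 0
--     n = len(t)
--     while i < n:
--         j = i
--         while j < n and t[j] == t[i]:
--             j += 1
--         if j - i == 1:
--             out.append(t[i])
--         i = j
--     return ''.join(out)
-- ===== Notes on version B (the rewrite author's own statement) =====
-- stated objective: alternative
-- what changed: Replaces the count-dict-then-filter-then-sort pipeline with sort-first run detection: the sorted characters are scanned once and singleton runs are emitted in order, maintaining no counts at all.
import Mathlib
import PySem

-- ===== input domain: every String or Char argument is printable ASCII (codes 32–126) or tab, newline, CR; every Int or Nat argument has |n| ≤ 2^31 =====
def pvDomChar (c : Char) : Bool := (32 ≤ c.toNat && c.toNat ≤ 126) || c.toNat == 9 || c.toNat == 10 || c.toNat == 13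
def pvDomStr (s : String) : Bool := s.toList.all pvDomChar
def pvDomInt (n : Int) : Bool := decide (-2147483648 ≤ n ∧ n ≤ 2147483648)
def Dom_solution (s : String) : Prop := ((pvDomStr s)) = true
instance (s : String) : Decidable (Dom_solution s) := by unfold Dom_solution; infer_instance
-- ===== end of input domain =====

-- B replaces the count-dict / filter / sort pipeline by sort-first run detection (alternative decomposition, same behaviour).

-- ===== PORT A =====
-- literal transliteration: build a count dict over the characters, keep keys with count 1, sort, join
def solution (s : String) : String :=
  let s_dict : PySem.Dict Char Int :=
    s.toList.foldl
      (fun d i =>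
        if d.contains i = false then d.insert i 1
        else d.insert i (d.getD i 0 + 1))   -- s_dict[i] += 1 (key present, so getD is exact)
      PySem.Dict.empty
  let s_list := s_dict.keys.filter (fun i => s_dict.getD i 0 == 1)  -- s_dict[i]: key present, getD exact
  let s_list := PySem.List.sorted s_list (fun x => x) false
  String.ofList s_list

-- ===== PORT B =====
-- inner while loop of Source B: advance j over the run of characters equal to the head,
-- keep the head iff the run has length 1; recursion on the remainder after the run
def pvRuns : List Char → List Char
  | [] => []
  | c :: rest =>
      if (rest.takeWhile (· == c)).isEmpty then c :: pvRuns (rest.dropWhile (· == c))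
      else pvRuns (rest.dropWhile (· == c))
  termination_by t => t.length
  decreasing_by
    all_goals
      simp only [List.length_cons]
      exact Nat.lt_succ_of_le (List.length_dropWhile_le _ rest)

def solution_alt (s : String) : String :=
  String.ofList (pvRuns (PySem.List.sorted s.toList (fun x => x) false))

-- ===== PRECONDITION & SPEC =====
def Spec_solution (s : String) (out : String) : Prop := out = solution_alt s
instance (s : String) (out : String) : Decidable (Spec_solution s out) := by unfold Spec_solution; infer_instance

-- ===== CLAIM (what is proved, stated in full; the proofs are below) =====
def Claim_equal_solution : Prop := ∀ (s : String), Dom_solution s → Spec_solution s (solution s)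

-- ===== LEMMAS AND PROOFS =====

-- the two branches of A's loop body compute the same insert
lemma pvStep_eq :
    (fun (d : PySem.Dict Char Int) i =>
        if d.contains i = false then d.insert i 1
        else d.insert i (d.getD i 0 + 1)) =
    fun d x => d.insert x (d.getD x 0 + 1) := by
  funext d i
  by_cases h : d.contains i = false
  · simp [h, PySem.Dict.getD_of_not_contains d (0 : Int) h]
  · simp [h]

-- head's character does not reappear after its run, in a sorted list
lemma pvNotMem_dropWhile {c : Char} {rest : List Char}
    (hp : (c :: rest).Pairwise (· ≤ ·)) :
    c ∉ rest.dropWhile (· == c) := by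
  intro hmem
  have hsub : (rest.dropWhile (· == c)).Sublist rest := List.dropWhile_sublist _
  have hprest : rest.Pairwise (fun a b : Char => a ≤ b) := hp.of_cons
  have hpd : (rest.dropWhile (· == c)).Pairwise (fun a b : Char => a ≤ b) :=
    hprest.sublist hsub
  cases hd : rest.dropWhile (· == c) with
  | nil => simp [hd] at hmem
  | cons d tail =>
      have hdne : ¬ (d == c) = true := by
        have := List.head?_dropWhile_not (· == c) rest
        rw [hd] at this; simpa using this
      have hdnec : d ≠ c := by simpa using hdne
      have hcled : c ≤ d := by
        have hdr : d ∈ rest := hsub.mem (by simp [hd])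
        exact (List.pairwise_cons.mp hp).1 d hdr
      rw [hd] at hmem hpd
      rcases List.mem_cons.mp hmem with h1 | h1
      · exact hdnec h1.symm
      · have : d ≤ c := (List.pairwise_cons.mp hpd).1 c h1
        exact hdnec (le_antisymm this hcled)

-- membership in the run output: exactly the characters occurring once
lemma pvRuns_mem {t : List Char} (hp : t.Pairwise (· ≤ ·)) (x : Char) :
    x ∈ pvRuns t ↔ x ∈ t ∧ t.count x = 1 := by
  induction t using pvRuns.induct with
  | case1 => simp [pvRuns]
  | case2 c rest he ih =>
      have hnot : c ∉ rest.dropWhile (· == c) := pvNotMem_dropWhile hp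
      have hpo : (rest.dropWhile (· == c)).Pairwise (fun a b : Char => a ≤ b) :=
        hp.of_cons.sublist (List.dropWhile_sublist _)
      have ih' := ih hpo
      have hte : rest.takeWhile (· == c) = [] := List.isEmpty_iff.mp he
      have hre : rest.dropWhile (· == c) = rest := by
        conv_rhs => rw [(List.takeWhile_append_dropWhile (p := (· == c)) (l := rest)).symm]
        simp [hte]
      rw [hre] at hnot hpo ih'
      have hcnt0 : rest.count c = 0 := List.count_eq_zero.mpr hnot
      rw [pvRuns, if_pos he, hre]
      constructor
      · intro hx
        rcases List.mem_cons.mp hx with h1 | h1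
        · subst h1
          exact ⟨List.mem_cons_self, by simp [hcnt0]⟩
        · obtain ⟨hmo, hco⟩ := ih'.mp h1
          have hxc : x ≠ c := fun h => hnot (h ▸ hmo)
          exact ⟨List.mem_cons_of_mem _ hmo, by simp [hco, Ne.symm hxc]⟩
      · rintro ⟨hmem, hcnt⟩
        by_cases hxc : x = c
        · subst hxc; exact List.mem_cons_self
        · have hmem' : x ∈ rest := by
            rcases List.mem_cons.mp hmem with h1 | h1
            · exact absurd h1 hxc
            · exact h1
          have hco : rest.count x = 1 := by
            simpa [List.count_cons, Ne.symm hxc] using hcnt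
          exact List.mem_cons_of_mem _ (ih'.mpr ⟨hmem', hco⟩)
  | case3 c rest he ih =>
      have hnot : c ∉ rest.dropWhile (· == c) := pvNotMem_dropWhile hp
      have hpo : (rest.dropWhile (· == c)).Pairwise (fun a b : Char => a ≤ b) :=
        hp.of_cons.sublist (List.dropWhile_sublist _)
      have ih' := ih hpo
      have hallc : ∀ y ∈ rest.takeWhile (· == c), y = c := by
        intro y hy; simpa using List.mem_takeWhile_imp hy
      have hrest : rest = rest.takeWhile (· == c) ++ rest.dropWhile (· == c) :=
        (List.takeWhile_append_dropWhile).symm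
      have hctw : ∀ y : Char, y ≠ c → (rest.takeWhile (· == c)).count y = 0 := by
        intro y hy
        rw [List.count_eq_zero]
        intro hmem; exact hy (hallc y hmem)
      have hsplit : ∀ y : Char,
          rest.count y = (rest.takeWhile (· == c)).count y + (rest.dropWhile (· == c)).count y := by
        intro y
        conv_lhs => rw [hrest]
        rw [List.count_append]
      rw [pvRuns, if_neg he]
      rw [ih']
      constructor
      · rintro ⟨hmo, hco⟩
        have hxc : x ≠ c := fun h => hnot (h ▸ hmo)
        refine ⟨List.mem_cons_of_mem _ ((List.dropWhile_sublist _).mem hmo), ?_⟩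
        simp [Ne.symm hxc, hsplit x, hctw x hxc, hco]
      · rintro ⟨hmem, hcnt⟩
        by_cases hxc : x = c
        · exfalso
          subst hxc
          have hne : rest.takeWhile (· == x) ≠ [] := fun h0 => he (by simp [h0])
          have htw1 : 1 ≤ (rest.takeWhile (· == x)).count x := by
            cases htwc : rest.takeWhile (· == x) with
            | nil => exact absurd htwc hne
            | cons a tl =>
                have ha : a = x := hallc a (by simp [htwc])
                subst ha
                simp
          rw [List.count_cons_self, hsplit x] at hcnt
          omega
        · have hmemo : x ∈ rest.dropWhile (· == c) := by
            have hmem' : x ∈ rest := by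
              rcases List.mem_cons.mp hmem with h1 | h1
              · exact absurd h1 hxc
              · exact h1
            rw [hrest] at hmem'
            rcases List.mem_append.mp hmem' with h1 | h1
            · exact absurd (hallc x h1) hxc
            · exact h1
          refine ⟨hmemo, ?_⟩
          have hcnt' : rest.count x = 1 := by
            simpa [List.count_cons, Ne.symm hxc] using hcnt
          rw [hsplit x, hctw x hxc] at hcnt'
          simpa using hcnt'

-- the run output is strictly increasing
lemma pvRuns_pairwise {t : List Char} (hp : t.Pairwise (· ≤ ·)) :
    (pvRuns t).Pairwise (· < ·) := by
  induction t using pvRuns.induct with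
  | case1 => simp [pvRuns]
  | case2 c rest he ih =>
      have hpo : (rest.dropWhile (· == c)).Pairwise (fun a b : Char => a ≤ b) :=
        hp.of_cons.sublist (List.dropWhile_sublist _)
      have hnot : c ∉ rest.dropWhile (· == c) := pvNotMem_dropWhile hp
      rw [pvRuns, if_pos he]
      refine List.pairwise_cons.mpr ⟨?_, ih hpo⟩
      intro x hx
      obtain ⟨hmo, _⟩ := (pvRuns_mem hpo x).mp hx
      have hxr : x ∈ rest := (List.dropWhile_sublist _).mem hmo
      have hle : c ≤ x := (List.pairwise_cons.mp hp).1 x hxr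
      have hne : x ≠ c := fun h => hnot (h ▸ hmo)
      exact lt_of_le_of_ne hle (fun h => hne h.symm)
  | case3 c rest he ih =>
      have hpo : (rest.dropWhile (· == c)).Pairwise (fun a b : Char => a ≤ b) :=
        hp.of_cons.sublist (List.dropWhile_sublist _)
      rw [pvRuns, if_neg he]
      exact ih hpo

-- ===== VERDICT (by name: the statement is the Claim_ definition above) =====
theorem solution_spec : Claim_equal_solution := by
  intro s _
  unfold Spec_solution solution solution_alt
  simp only [pvStep_eq, PySem.Dict.foldl_insert_getD_add_one_eq_counter,
    PySem.Dict.keys_counter, PySem.Dict.getD_counter]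
  set l := s.toList with hl
  set t := PySem.List.sorted l (fun x => x) false with ht
  have hpt : t.Pairwise (fun a b : Char => a ≤ b) := PySem.List.sorted_pairwise l _
  have hperm : t.Perm l := PySem.List.sorted_perm l _ _
  -- A's filtered key list, with the count predicate in Nat form
  have hfilt : (PySem.Set.ofList l).filter (fun i => (l.count i : Int) == 1) =
      (PySem.Set.ofList l).filter (fun i => l.count i == 1) := by
    apply List.filter_congr
    intro x _
    by_cases hc : l.count x = 1
    · simp [hc]
    · simp [hc, (by exact_mod_cast hc : (l.count x : Int) ≠ 1)]
  rw [hfilt]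
  congr 1
  -- B's list is a strictly increasing permutation of A's (unsorted) filtered list
  apply PySem.List.sorted_eq_of_perm_of_pairwise_lt _ _ _ ?_ ?_
  · -- Perm: same distinct elements (count-1 characters), both nodup
    have hnd1 : (pvRuns t).Nodup := (pvRuns_pairwise hpt).imp ne_of_lt
    have hnd2 : ((PySem.Set.ofList l).filter (fun i => l.count i == 1)).Nodup :=
      (PySem.Set.nodup_ofList l).filter _
    rw [List.perm_ext_iff_of_nodup hnd1 hnd2]
    intro x
    rw [pvRuns_mem hpt x]
    constructor
    · rintro ⟨hmem, hcnt⟩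
      rw [List.mem_filter]
      refine ⟨(PySem.Set.mem_ofList l x).mpr (hperm.mem_iff.mp hmem), ?_⟩
      rw [hperm.count_eq] at hcnt
      simp [hcnt]
    · intro h
      rw [List.mem_filter] at h
      refine ⟨hperm.mem_iff.mpr ((PySem.Set.mem_ofList l x).mp h.1), ?_⟩
      rw [hperm.count_eq]
      simpa using h.2
  · exact pvRuns_pairwise hpt
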